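-- pv_equiv track=rewrite | github.com/wansik5991/Programmers_JoyStick | joystick.py | solution
-- ===== SOURCE A (Python) =====
-- def solution(name):
--     current = 0
--     cnt = list(map(lambda x : min(ord(x) - ord('A'), ord('Z') - ord(x) + 1), name))
--
--     for i in range(len(cnt)) :
--         if cnt[i] != 0:
--             current, answer = i, i;
--             break;
--
--     while True :
--         answer += cnt[current]
--         cnt[current]=0
--
--         if all(i == 0 for i in cnt) :
--             break;
--
--         left, right = current -1, (current +1) % len(name)
--         dist_left, dist_right = 1,1
--
--         while cnt[left] == 0 :
--             dist_left += 1;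
--             left -= 1;
--         while cnt[right] == 0 :
--             dist_right +=1;
--             right = (right+1) % len(name);
--
--
--         if dist_left > dist_right :
--             current = right
--             answer += dist_right
--         else :
--             current = len(name) + left if left < 0 else left
--             answer += dist_left
--
--     return answer
-- ===== SOURCE B (Python) =====
-- def solution(name):
--     n = len(name)
--     cnt = [min(ord(c) - 65, 91 - ord(c)) for c in name]
--     pos = [i for i, v in enumerate(cnt) if v != 0]
--     m = len(pos)
--     if m == 0:
--         return 0
--     answer = pos[0] + sum(cnt[p] for p in pos)
--     li = ri = cur = 0
--     for _ in range(m - 1):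
--         tl, tr = pos[(li - 1) % m], pos[(ri + 1) % m]
--         dl = (pos[cur] - tl) % n
--         dr = (tr - pos[cur]) % n
--         if dl > dr:
--             ri = (ri + 1) % m
--             cur, answer = ri, answer + dr
--         else:
--             li = (li - 1) % m
--             cur, answer = li, answer + dl
--     return answer
-- ===== Notes on version B (the rewrite author's own statement) =====
-- stated objective: faster
-- what changed: A repeatedly zeroes the cost array and re-scans it step by step each round (two sentinel walks plus a full all()-zero check); B precomputes the list of nonzero positions and its total vertical cost once, then exploits that the visited positions always form a cyclic arc: two arc-end pointers give both candidate targets in O(1) by index arithmetic, no scanning or mutation at all.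
import Mathlib
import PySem

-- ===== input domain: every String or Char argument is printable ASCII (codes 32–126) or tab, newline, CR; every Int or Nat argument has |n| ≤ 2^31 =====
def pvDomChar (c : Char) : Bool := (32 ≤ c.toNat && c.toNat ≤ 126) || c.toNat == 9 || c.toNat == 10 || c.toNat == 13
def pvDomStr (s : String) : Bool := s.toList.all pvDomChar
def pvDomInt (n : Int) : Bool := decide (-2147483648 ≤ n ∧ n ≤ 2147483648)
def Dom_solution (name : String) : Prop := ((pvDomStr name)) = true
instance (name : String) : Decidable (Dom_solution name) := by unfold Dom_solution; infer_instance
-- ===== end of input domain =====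

-- B replaces A's destructive greedy (zero the cost array, re-scan it step by step each round
-- plus a full all()-zero check) by a closed walk over the precomputed list of nonzero positions:
-- the visited positions always form a cyclic arc, so B keeps two arc-end pointers, reads the two
-- candidate targets in O(1) by index arithmetic, and pre-sums the vertical cost; objective: faster.

-- ===== PORT A =====
-- `for i in range(len(cnt)): if cnt[i] != 0: current, answer = i, i; break`
def aFind : List Int → Option Nat
  | [] => none
  | v :: rest => if v ≠ 0 then some 0 else (aFind rest).map (· + 1)

-- `while cnt[left] == 0: dist_left += 1; left -= 1`  (fuel-guarded; inside Pre_ a nonzero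
-- entry exists within len(cnt) steps, so the fuel/none fallbacks are never reached)
def aScanLeft (cnt : List Int) : Nat → Int → Int → Int × Int
  | 0, left, dist => (left, dist)
  | fuel + 1, left, dist =>
    match PySem.List.pyGet? cnt left with
    | some v => if v == 0 then aScanLeft cnt fuel (left - 1) (dist + 1) else (left, dist)
    | none => (left, dist)

-- `while cnt[right] == 0: dist_right += 1; right = (right+1) % len(name)`
def aScanRight (cnt : List Int) (n : Int) : Nat → Int → Int → Int × Int
  | 0, right, dist => (right, dist)
  | fuel + 1, right, dist =>
    match PySem.List.pyGet? cnt right with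
    | some v => if v == 0 then aScanRight cnt n fuel (PySem.Int.mod (right + 1) n) (dist + 1) else (right, dist)
    | none => (right, dist)

-- the `while True:` loop; fuel = number of nonzero entries (each round zeroes one, so it
-- is exactly the number of rounds; the fuel-0 fallback is never reached)
def aLoop (n : Int) : Nat → List Int → Int → Int → Int
  | 0, _, _, answer => answer
  | fuel + 1, cnt, current, answer =>
    let answer := answer + PySem.List.pyGetD cnt current 0   -- cnt[current], always in range here
    let cnt := PySem.List.pySetD cnt current 0               -- cnt[current] = 0
    if cnt.all (fun i => i == 0) then answer
    else
      let lp := aScanLeft cnt cnt.length (current - 1) 1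
      let rp := aScanRight cnt n cnt.length (PySem.Int.mod (current + 1) n) 1
      if lp.2 > rp.2 then aLoop n fuel cnt rp.1 (answer + rp.2)
      else aLoop n fuel cnt (if lp.1 < 0 then n + lp.1 else lp.1) (answer + lp.2)

def solution (name : String) : Int :=
  let cnt : List Int := name.toList.map (fun x => min ((x.toNat : Int) - 65) (90 - (x.toNat : Int) + 1))
  match aFind cnt with
  | none => 0   -- Python: `answer` was never bound → UnboundLocalError; excluded by Pre_
  | some i => aLoop (name.toList.length : Int) (cnt.countP (fun v => v ≠ 0)) cnt (i : Int) (i : Int)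

-- ===== PORT B =====
-- one iteration of `for _ in range(m - 1)`: state (li, ri, cur, answer)
def bStep (pos : List Int) (n m : Int) : Int × Int × Int × Int → Int × Int × Int × Int
  | (li, ri, cur, answer) =>
    let tl := PySem.List.pyGetD pos (PySem.Int.mod (li - 1) m) 0
    let tr := PySem.List.pyGetD pos (PySem.Int.mod (ri + 1) m) 0
    let pc := PySem.List.pyGetD pos cur 0
    let dl := PySem.Int.mod (pc - tl) n
    let dr := PySem.Int.mod (tr - pc) n
    if dl > dr then
      let ri' := PySem.Int.mod (ri + 1) m
      (li, ri', ri', answer + dr)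
    else
      let li' := PySem.Int.mod (li - 1) m
      (li', ri, li', answer + dl)

def solution_alt (name : String) : Int :=
  let n : Int := name.toList.length
  let cnt : List Int := name.toList.map (fun c => min ((c.toNat : Int) - 65) (91 - (c.toNat : Int)))
  let pos : List Int := ((PySem.List.enumerate cnt 0).filter (fun p => p.2 != 0)).map (·.1)
  let m := pos.length
  if m == 0 then 0
  else
    let answer := PySem.List.pyGetD pos 0 0 + (pos.map (fun p => PySem.List.pyGetD cnt p 0)).sum
    let st := (List.range (m - 1)).foldl (fun st _ => bStep pos n (m : Int) st) (0, 0, 0, answer)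
    st.2.2.2

-- ===== PRECONDITION & SPEC =====
-- Pre_ excludes exactly the inputs (every character 'A' or '[', incl. the empty string) on
-- which A raises UnboundLocalError: no character needs any up/down press, so `answer` is
-- never bound before it is read.
def Pre_solution (name : String) : Prop := (name.toList.any (fun c => !(c == 'A') && !(c == '['))) = true
instance (name : String) : Decidable (Pre_solution name) := by unfold Pre_solution; infer_instance

def pvWitness_solution : String := "JAZ"

def Spec_solution (name : String) (out : Int) : Prop := out = solution_alt name
instance (name : String) (out : Int) : Decidable (Spec_solution name out) := by unfold Spec_solution; infer_instance

-- ===== CLAIM (what is proved, stated in full; the proofs are below) =====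
def Claim_equal_solution : Prop := ∀ (name : String), Dom_solution name → Pre_solution name → Spec_solution name (solution name)

-- ===== LEMMAS AND PROOFS =====

-- proof-only helpers: B's foldl as an iterator, and an indicator sum over residues
def pvIter (pos : List Int) (n m : Int) : Nat → (Int × Int × Int × Int) → (Int × Int × Int × Int)
  | 0, st => st
  | k + 1, st => pvIter pos n m k (bStep pos n m st)

def pvS (m : Nat) (p : Nat → Bool) (g : Nat → Int) : Int :=
  ∑ j ∈ Finset.range m, (if p j then g j else 0)

theorem pv_foldl_iter (pos : List Int) (n m : Int) :
    ∀ (l : List Nat) (st : Int × Int × Int × Int),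
      List.foldl (fun st _ => bStep pos n m st) st l = pvIter pos n m l.length st := by
  intro l
  induction l with
  | nil => intro st; rfl
  | cons a t ih => intro st; simp only [List.foldl_cons, List.length_cons, pvIter]; exact ih _

theorem pv_sum_split (m : Nat) (p q : Nat → Bool) (g : Nat → Int) (t : Nat) (ht : t < m)
    (hqt : q t = false) (hpq : ∀ j, j < m → p j = (q j || j == t)) :
    pvS m p g = pvS m q g + g t := by
  unfold pvS
  have h1 : ∀ j ∈ Finset.range m,
      (if p j then g j else 0) = (if q j then g j else 0) + (if j = t then g j else 0) := by
    intro j hj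
    rw [hpq j (Finset.mem_range.1 hj)]
    by_cases hjt : j = t
    · subst hjt; simp [hqt]
    · simp [hjt]
  rw [Finset.sum_congr rfl h1, Finset.sum_add_distrib]
  congr 1
  rw [Finset.sum_ite_eq' (Finset.range m) t g, if_pos (Finset.mem_range.2 ht)]

theorem pv_sum_map (l : List Int) (f : Int → Int) :
    (l.map f).sum = ∑ j ∈ Finset.range l.length, f (l.getD j 0) := by
  induction l with
  | nil => simp
  | cons a t ih =>
    rw [List.map_cons, List.sum_cons, List.length_cons, Finset.sum_range_succ']
    simp only [List.getD_cons_succ, List.getD_cons_zero]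
    rw [ih]; ring

theorem pv_emod_shift (x n : Int) : (x + n) % n = x % n := by
  have h := Int.add_mul_emod_self_left (a := x) (b := n) (c := 1)
  simp only [mul_one] at h
  exact h

theorem pv_emod_neg (x n : Int) (_hn : 0 < n) (h1 : -n ≤ x) (h2 : x < 0) : x % n = x + n := by
  rw [← pv_emod_shift x n]; exact Int.emod_eq_of_lt (by omega) (by omega)

theorem pv_headD_le_mem (l : List Int) (hl : l.Pairwise (· < ·)) : ∀ x ∈ l, l.headD 0 ≤ x := by
  cases l with
  | nil => intro x hx; cases hx
  | cons a t =>
    intro x hx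
    rcases List.mem_cons.1 hx with rfl | hx'
    · simp
    · exact le_of_lt (by simp at hx' ⊢; exact List.rel_of_pairwise_cons hl hx')

theorem pv_pyGet?_inrange (xs : List Int) (x : Int) (h1 : -(xs.length : Int) ≤ x) (h2 : x < xs.length) :
    PySem.List.pyGet? xs x = some (PySem.List.pyGetD xs x 0) := by
  by_cases hx : 0 ≤ x
  · rw [PySem.List.pyGet?_of_nonneg xs hx, PySem.List.pyGetD_eq_getElem xs 0 hx h2]
    exact List.getElem?_eq_getElem (by omega)
  · have hk : x = -(((-x).toNat : Nat) : Int) := by omega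
    rw [hk, PySem.List.pyGet?_neg_natCast xs (-x).toNat (by omega) (by omega),
        PySem.List.pyGetD_neg_natCast xs (-x).toNat 0 (by omega) (by omega)]
    exact List.getElem?_eq_getElem (by omega)

theorem pv_pyGetD_emod (xs : List Int) (x : Int) (h1 : -(xs.length : Int) ≤ x) (h2 : x < xs.length) :
    PySem.List.pyGetD xs x 0 = PySem.List.pyGetD xs (x % (xs.length : Int)) 0 := by
  by_cases hx : 0 ≤ x
  · rw [Int.emod_eq_of_lt hx h2]
  · have hn : (0:Int) < xs.length := by omega
    have hx' : x % (xs.length : Int) = x + xs.length := pv_emod_neg _ _ hn h1 (by omega)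
    have h0 : (0:Int) ≤ x + xs.length := by omega
    have hL : PySem.List.pyGetD xs x 0 = xs[xs.length - (-x).toNat]'(by omega) := by
      conv_lhs => rw [show x = -(((-x).toNat : Nat) : Int) by omega]
      rw [PySem.List.pyGetD_neg_natCast xs (-x).toNat 0 (by omega) (by omega)]
    rw [hL, hx', PySem.List.pyGetD_eq_getElem xs 0 h0 (by omega)]
    simp [show (x + (xs.length:Int)).toNat = xs.length - (-x).toNat by omega]

theorem pv_scanLeft_run (cnt' : List Int) (cur d : Int)
    (hd1 : 1 ≤ d) (hdn : d < (cnt'.length : Int)) (hc0 : 0 ≤ cur) (hcn : cur < (cnt'.length : Int))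
    (hz : ∀ e : Int, 1 ≤ e → e < d → PySem.List.pyGetD cnt' (cur - e) 0 = 0)
    (hs : PySem.List.pyGetD cnt' (cur - d) 0 ≠ 0) :
    ∀ (k fuel : Nat) (dist : Int), dist = d - k → 1 ≤ dist → k < fuel →
      aScanLeft cnt' fuel (cur - dist) dist = (cur - d, d) := by
  intro k
  induction k with
  | zero =>
    intro fuel dist hdist h1 hf
    cases fuel with
    | zero => omega
    | succ f =>
      have hdist' : dist = d := by omega
      subst hdist'
      rw [aScanLeft, pv_pyGet?_inrange cnt' (cur - dist) (by omega) (by omega)]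
      simp [hs]
  | succ k ih =>
    intro fuel dist hdist h1 hf
    cases fuel with
    | zero => omega
    | succ f =>
      rw [aScanLeft, pv_pyGet?_inrange cnt' (cur - dist) (by omega) (by omega)]
      have hz' : PySem.List.pyGetD cnt' (cur - dist) 0 = 0 := hz dist h1 (by omega)
      rw [hz']
      simp only [BEq.rfl, if_true]
      rw [show cur - dist - 1 = cur - (dist + 1) by ring]
      exact ih f (dist + 1) (by omega) (by omega) (by omega)

theorem pv_scanRight_run (cnt' : List Int) (n cur d : Int) (hn : n = (cnt'.length : Int))
    (h2n : 2 ≤ n) (hd1 : 1 ≤ d) (hdn : d < n) (_hc0 : 0 ≤ cur) (_hcn : cur < n)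
    (hz : ∀ e : Int, 1 ≤ e → e < d → PySem.List.pyGetD cnt' ((cur + e) % n) 0 = 0)
    (hs : PySem.List.pyGetD cnt' ((cur + d) % n) 0 ≠ 0) :
    ∀ (k fuel : Nat) (dist : Int), dist = d - k → 1 ≤ dist → k < fuel →
      aScanRight cnt' n fuel ((cur + dist) % n) dist = ((cur + d) % n, d) := by
  intro k
  induction k with
  | zero =>
    intro fuel dist hdist h1 hf
    cases fuel with
    | zero => omega
    | succ f =>
      have hdist' : dist = d := by omega
      subst hdist'
      have hr0 : 0 ≤ (cur + dist) % n := Int.emod_nonneg _ (by omega)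
      have hr1 : (cur + dist) % n < n := Int.emod_lt_of_pos _ (by omega)
      rw [aScanRight, pv_pyGet?_inrange cnt' ((cur + dist) % n) (by omega) (by omega)]
      simp [hs]
  | succ k ih =>
    intro fuel dist hdist h1 hf
    cases fuel with
    | zero => omega
    | succ f =>
      have hr0 : 0 ≤ (cur + dist) % n := Int.emod_nonneg _ (by omega)
      have hr1 : (cur + dist) % n < n := Int.emod_lt_of_pos _ (by omega)
      rw [aScanRight, pv_pyGet?_inrange cnt' ((cur + dist) % n) (by omega) (by omega)]
      have hz' : PySem.List.pyGetD cnt' ((cur + dist) % n) 0 = 0 := hz dist h1 (by omega)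
      rw [hz']
      simp only [BEq.rfl, if_true]
      have h1n : (1:Int) % n = 1 := Int.emod_eq_of_lt (by omega) (by omega)
      have hstep : PySem.Int.mod ((cur + dist) % n + 1) n = (cur + (dist + 1)) % n := by
        rw [PySem.Int.mod_eq_emod_of_pos (by omega),
            show cur + (dist + 1) = cur + dist + 1 by ring,
            Int.add_emod (cur + dist) 1 n, h1n]
      rw [hstep]
      exact ih f (dist + 1) (by omega) (by omega) (by omega)

theorem pv_aFind_none : ∀ (cnt : List Int), aFind cnt = none ↔ ∀ v ∈ cnt, v = 0 := by
  intro cnt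
  induction cnt with
  | nil => simp [aFind]
  | cons v rest ih =>
    by_cases hv : v = 0
    · subst hv
      simp [aFind, Option.map_eq_none_iff, ih]
    · simp [aFind, hv]

theorem pv_aFind_some : ∀ (cnt : List Int) (j : Nat), aFind cnt = some j →
    ∃ h : j < cnt.length, cnt[j] ≠ 0 ∧ ∀ i (hi : i < j), cnt[i]'(by omega) = 0 := by
  intro cnt
  induction cnt with
  | nil => intro j h; simp [aFind] at h
  | cons v rest ih =>
    intro j h
    by_cases hv : v = 0
    · subst hv
      rw [show aFind (0 :: rest) = (aFind rest).map (· + 1) from by simp [aFind]] at h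
      rcases Option.map_eq_some_iff.1 h with ⟨j', hj', rfl⟩
      obtain ⟨hlt, hnz, hzero⟩ := ih j' hj'
      refine ⟨by simpa using Nat.succ_lt_succ hlt, by simpa using hnz, ?_⟩
      intro i hi
      cases i with
      | zero => simp
      | succ i' => simpa using hzero i' (by omega)
    · simp only [aFind, ne_eq, hv, not_false_eq_true, if_pos] at h
      cases h
      exact ⟨by simp, by simpa using hv, by omega⟩

theorem pv_countP_range : ∀ (l : List Int),
    (List.range l.length).countP (fun k => decide (l.getD k 0 ≠ 0)) = l.countP (fun v => decide (v ≠ 0)) := by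
  intro l
  induction l with
  | nil => rfl
  | cons a t ih =>
    rw [List.length_cons, List.range_succ_eq_map, List.countP_cons, List.countP_map, List.countP_cons]
    have hc : List.countP ((fun k => decide ((a :: t).getD k 0 ≠ 0)) ∘ Nat.succ) (List.range t.length)
        = List.countP (fun k => decide (t.getD k 0 ≠ 0)) (List.range t.length) := by
      apply List.countP_congr
      intro k _
      simp [Function.comp]
    rw [hc, ih]
    simp

theorem pv_rem_length (cnt : List Int) :
    ((PySem.List.pyRange 0 (cnt.length : Int) 1).filter (fun i => PySem.List.pyGetD cnt i 0 ≠ 0)).length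
      = cnt.countP (fun v => v ≠ 0) := by
  rw [← List.countP_eq_length_filter, PySem.List.pyRange_one, List.countP_map]
  rw [← pv_countP_range cnt]
  apply List.countP_congr
  intro k hk
  have hk' : k < cnt.length := by
    have := List.mem_range.1 hk
    omega
  simp [Function.comp, PySem.List.pyGetD_natCast]

theorem pv_mem_rem (cnt : List Int) (i : Int) :
    (i ∈ (PySem.List.pyRange 0 (cnt.length : Int) 1).filter (fun i => PySem.List.pyGetD cnt i 0 ≠ 0)) ↔
      (0 ≤ i ∧ i < (cnt.length : Int) ∧ PySem.List.pyGetD cnt i 0 ≠ 0) := by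
  rw [List.mem_filter, PySem.List.mem_pyRange_one]
  simp [and_assoc]

theorem pv_sorted_rem (cnt : List Int) :
    ((PySem.List.pyRange 0 (cnt.length : Int) 1).filter (fun i => PySem.List.pyGetD cnt i 0 ≠ 0)).Pairwise (· < ·) := by
  apply List.Pairwise.filter
  rw [PySem.List.pyRange_one]
  rw [List.pairwise_map]
  exact List.pairwise_lt_range.imp (by intro a b h; omega)

-- value of a cyclic distance between two distinct positions of the sorted list pos
theorem pv_D_val (pos : List Int) (n : Int)
    (hbnd : ∀ x ∈ pos, 0 ≤ x ∧ x < n)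
    (hmono : ∀ j k : Nat, j < pos.length → k < pos.length → j < k → pos.getD j 0 < pos.getD k 0)
    (c j : Nat) (hc : c < pos.length) (hj : j < pos.length) (hne : j ≠ c) :
    (pos.getD c 0 - pos.getD j 0) % n
      = if j < c then pos.getD c 0 - pos.getD j 0 else pos.getD c 0 - pos.getD j 0 + n := by
  have hmc : pos.getD c 0 ∈ pos := by
    rw [List.getD_eq_getElem _ _ hc]; exact List.getElem_mem _
  have hmj : pos.getD j 0 ∈ pos := by
    rw [List.getD_eq_getElem _ _ hj]; exact List.getElem_mem _
  have hbc := hbnd _ hmc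
  have hbj := hbnd _ hmj
  rcases Nat.lt_or_ge j c with hlt | hge
  · have hv := hmono j c hj hc hlt
    rw [if_pos hlt]
    exact Int.emod_eq_of_lt (by omega) (by omega)
  · have hlt' : c < j := by omega
    have hv := hmono c j hc hj hlt'
    rw [if_neg (by omega)]
    exact pv_emod_neg _ _ (by omega) (by omega) (by omega)

-- going left from residue c, cyclic value-distance is monotone in cyclic residue-distance
theorem pv_D_mono_left (pos : List Int) (n : Int)
    (hbnd : ∀ x ∈ pos, 0 ≤ x ∧ x < n)
    (hmono : ∀ j k : Nat, j < pos.length → k < pos.length → j < k → pos.getD j 0 < pos.getD k 0)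
    (c j k : Nat) (hc : c < pos.length) (hj : j < pos.length) (hk : k < pos.length)
    (hjc : j ≠ c) (hkc : k ≠ c)
    (hd : ((c:Int) - j) % (pos.length : Int) ≤ ((c:Int) - k) % (pos.length : Int)) :
    (pos.getD c 0 - pos.getD j 0) % n ≤ (pos.getD c 0 - pos.getD k 0) % n := by
  have hM : (0:Int) < pos.length := by omega
  have hdj : ((c:Int) - j) % (pos.length : Int)
      = if j ≤ c then (c:Int) - j else (c:Int) - j + pos.length := by
    split_ifs with h
    · exact Int.emod_eq_of_lt (by omega) (by omega)
    · exact pv_emod_neg _ _ hM (by omega) (by omega)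
  have hdk : ((c:Int) - k) % (pos.length : Int)
      = if k ≤ c then (c:Int) - k else (c:Int) - k + pos.length := by
    split_ifs with h
    · exact Int.emod_eq_of_lt (by omega) (by omega)
    · exact pv_emod_neg _ _ hM (by omega) (by omega)
  rw [pv_D_val pos n hbnd hmono c j hc hj hjc, pv_D_val pos n hbnd hmono c k hc hk hkc]
  have hmc : pos.getD c 0 ∈ pos := by
    rw [List.getD_eq_getElem _ _ hc]; exact List.getElem_mem _
  have hmj : pos.getD j 0 ∈ pos := by
    rw [List.getD_eq_getElem _ _ hj]; exact List.getElem_mem _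
  have hmk : pos.getD k 0 ∈ pos := by
    rw [List.getD_eq_getElem _ _ hk]; exact List.getElem_mem _
  have hbc := hbnd _ hmc
  have hbj := hbnd _ hmj
  have hbk := hbnd _ hmk
  have hkj : k ≤ j → pos.getD k 0 ≤ pos.getD j 0 := by
    intro h
    rcases Nat.lt_or_ge k j with h' | h'
    · exact le_of_lt (hmono k j hk hj h')
    · have : k = j := by omega
      subst this; exact le_rfl
  rw [hdj, hdk] at hd
  split_ifs at hd with h1 h2 h2
  · have := hkj (by omega); omega
  · omega
  · omega
  · have := hkj (by omega); omega

-- going right from residue c (mirror image)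
theorem pv_D_mono_right (pos : List Int) (n : Int)
    (hbnd : ∀ x ∈ pos, 0 ≤ x ∧ x < n)
    (hmono : ∀ j k : Nat, j < pos.length → k < pos.length → j < k → pos.getD j 0 < pos.getD k 0)
    (c j k : Nat) (hc : c < pos.length) (hj : j < pos.length) (hk : k < pos.length)
    (hjc : j ≠ c) (hkc : k ≠ c)
    (hd : ((j:Int) - c) % (pos.length : Int) ≤ ((k:Int) - c) % (pos.length : Int)) :
    (pos.getD j 0 - pos.getD c 0) % n ≤ (pos.getD k 0 - pos.getD c 0) % n := by
  have hM : (0:Int) < pos.length := by omega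
  have hdj : ((j:Int) - c) % (pos.length : Int)
      = if c ≤ j then (j:Int) - c else (j:Int) - c + pos.length := by
    split_ifs with h
    · exact Int.emod_eq_of_lt (by omega) (by omega)
    · exact pv_emod_neg _ _ hM (by omega) (by omega)
  have hdk : ((k:Int) - c) % (pos.length : Int)
      = if c ≤ k then (k:Int) - c else (k:Int) - c + pos.length := by
    split_ifs with h
    · exact Int.emod_eq_of_lt (by omega) (by omega)
    · exact pv_emod_neg _ _ hM (by omega) (by omega)
  rw [pv_D_val pos n hbnd hmono j c hj hc (Ne.symm hjc),
      pv_D_val pos n hbnd hmono k c hk hc (Ne.symm hkc)]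
  have hmc : pos.getD c 0 ∈ pos := by
    rw [List.getD_eq_getElem _ _ hc]; exact List.getElem_mem _
  have hmj : pos.getD j 0 ∈ pos := by
    rw [List.getD_eq_getElem _ _ hj]; exact List.getElem_mem _
  have hmk : pos.getD k 0 ∈ pos := by
    rw [List.getD_eq_getElem _ _ hk]; exact List.getElem_mem _
  have hbc := hbnd _ hmc
  have hbj := hbnd _ hmj
  have hbk := hbnd _ hmk
  have hjk : j ≤ k → pos.getD j 0 ≤ pos.getD k 0 := by
    intro h
    rcases Nat.lt_or_ge j k with h' | h'
    · exact le_of_lt (hmono j k hj hk h')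
    · have : j = k := by omega
      subst this; exact le_rfl
  rw [hdj, hdk] at hd
  split_ifs at hd with h1 h2 h2
  · have := hjk (by omega); omega
  · omega
  · omega
  · have := hjk (by omega); omega

-- collapsing an inner emod inside a difference
theorem pv_sub_emod_left (a b n : Int) : (a % n - b) % n = (a - b) % n := by
  conv_lhs => rw [Int.sub_emod (a % n) b n, Int.emod_emod_of_dvd a dvd_rfl]
  rw [← Int.sub_emod]

theorem pv_sub_emod_right (a b n : Int) : (a - b % n) % n = (a - b) % n := by
  conv_lhs => rw [Int.sub_emod a (b % n) n, Int.emod_emod_of_dvd b dvd_rfl]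
  rw [← Int.sub_emod]

-- residue-distance from c to the left arc neighbour (L-1)%M is minimal among remaining residues
theorem pv_delta_left (M L R : Int) (c j : Nat) (hM2 : 2 ≤ M) (hLR : L ≤ R) (hsz : R - L ≤ M - 2)
    (hc : (c:Int) = L % M ∨ (c:Int) = R % M) (_hj : (j:Int) < M)
    (hrem : R - L < ((j:Int) - L) % M) :
    ((c:Int) - ((L - 1) % M)) % M ≤ ((c:Int) - (j:Int)) % M := by
  have hM0 : (0:Int) < M := by omega
  have ha0 : 0 ≤ ((j:Int) - L) % M := Int.emod_nonneg _ (by omega)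
  have ha1 : ((j:Int) - L) % M < M := Int.emod_lt_of_pos _ hM0
  rcases hc with hc | hc
  · have h1 : ((c:Int) - (L - 1) % M) % M = 1 := by
      rw [hc, pv_sub_emod_right, pv_sub_emod_left, show L - (L - 1) = 1 by ring]
      exact Int.emod_eq_of_lt (by omega) (by omega)
    have h2 : ((c:Int) - (j:Int)) % M = (L - (j:Int)) % M := by
      rw [hc, pv_sub_emod_left]
    have hne : (L - (j:Int)) % M ≠ 0 := by
      intro h0
      have hdvd : M ∣ -(L - (j:Int)) := dvd_neg.mpr (Int.dvd_of_emod_eq_zero h0)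
      rw [show -(L - (j:Int)) = (j:Int) - L by ring] at hdvd
      have := Int.emod_eq_zero_of_dvd hdvd
      omega
    have hge : 0 ≤ (L - (j:Int)) % M := Int.emod_nonneg _ (by omega)
    omega
  · have h1 : ((c:Int) - (L - 1) % M) % M = R - L + 1 := by
      rw [hc, pv_sub_emod_right, pv_sub_emod_left, show R - (L - 1) = R - L + 1 by ring]
      exact Int.emod_eq_of_lt (by omega) (by omega)
    have h2 : ((c:Int) - (j:Int)) % M = (R - (j:Int)) % M := by
      rw [hc, pv_sub_emod_left]
    have h3 : (R - L - ((j:Int) - L) % M) % M = (R - (j:Int)) % M := by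
      rw [pv_sub_emod_right, show R - L - ((j:Int) - L) = R - (j:Int) by ring]
    have h4 : (R - L - ((j:Int) - L) % M) % M = R - L - ((j:Int) - L) % M + M :=
      pv_emod_neg _ _ hM0 (by omega) (by omega)
    omega

-- residue-distance from c to the right arc neighbour (R+1)%M is minimal among remaining residues
theorem pv_delta_right (M L R : Int) (c j : Nat) (hM2 : 2 ≤ M) (hLR : L ≤ R) (hsz : R - L ≤ M - 2)
    (hc : (c:Int) = L % M ∨ (c:Int) = R % M) (_hj : (j:Int) < M)
    (hrem : R - L < ((j:Int) - L) % M) :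
    (((R + 1) % M) - (c:Int)) % M ≤ ((j:Int) - (c:Int)) % M := by
  have hM0 : (0:Int) < M := by omega
  have ha0 : 0 ≤ ((j:Int) - L) % M := Int.emod_nonneg _ (by omega)
  have ha1 : ((j:Int) - L) % M < M := Int.emod_lt_of_pos _ hM0
  rcases hc with hc | hc
  · have h1 : (((R + 1) % M) - (c:Int)) % M = R - L + 1 := by
      rw [hc, pv_sub_emod_left, pv_sub_emod_right, show R + 1 - L = R - L + 1 by ring]
      exact Int.emod_eq_of_lt (by omega) (by omega)
    have h2 : ((j:Int) - (c:Int)) % M = ((j:Int) - L) % M := by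
      rw [hc, pv_sub_emod_right]
    omega
  · have h1 : (((R + 1) % M) - (c:Int)) % M = 1 := by
      rw [hc, pv_sub_emod_left, pv_sub_emod_right, show R + 1 - R = 1 by ring]
      exact Int.emod_eq_of_lt (by omega) (by omega)
    have h2 : ((j:Int) - (c:Int)) % M = ((j:Int) - R) % M := by
      rw [hc, pv_sub_emod_right]
    have hne : ((j:Int) - R) % M ≠ 0 := by
      intro h0
      have : ((j:Int) - L) % M = (R - L) % M := by
        rw [Int.emod_eq_emod_iff_emod_sub_eq_zero,
            show (j:Int) - L - (R - L) = (j:Int) - R by ring]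
        exact h0
      rw [Int.emod_eq_of_lt (a := R - L) (by omega) (by omega)] at this
      omega
    have hge : 0 ≤ ((j:Int) - R) % M := Int.emod_nonneg _ (by omega)
    omega

-- the two arc neighbours are themselves remaining residues
theorem pv_rem_tl (M L R : Int) (hM2 : 2 ≤ M) (_hLR : L ≤ R) (hsz : R - L ≤ M - 2) :
    R - L < (((L - 1) % M) - L) % M := by
  have h : (((L - 1) % M) - L) % M = -1 + M := by
    rw [pv_sub_emod_left, show L - 1 - L = (-1:Int) by ring]
    exact pv_emod_neg (-1) M (by omega) (by omega) (by omega)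
  omega

theorem pv_rem_tr (M L R : Int) (_hM2 : 2 ≤ M) (hLR : L ≤ R) (hsz : R - L ≤ M - 2) :
    R - L < (((R + 1) % M) - L) % M := by
  have h : (((R + 1) % M) - L) % M = R - L + 1 := by
    rw [pv_sub_emod_left, show R + 1 - L = R - L + 1 by ring]
    exact Int.emod_eq_of_lt (by omega) (by omega)
  omega

-- the cursor residue is inside the arc
theorem pv_notrem_c (M L R : Int) (c : Nat) (_hM0 : 0 < M) (hLR : L ≤ R) (hsz : R - L ≤ M - 1)
    (hc : (c:Int) = L % M ∨ (c:Int) = R % M) :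
    ¬ (R - L < ((c:Int) - L) % M) := by
  rcases hc with hc | hc
  · have h : ((c:Int) - L) % M = 0 := by
      rw [hc, pv_sub_emod_left]
      simp
    omega
  · have h : ((c:Int) - L) % M = R - L := by
      rw [hc, pv_sub_emod_left]
      exact Int.emod_eq_of_lt (by omega) (by omega)
    omega

-- extending the arc to the left removes exactly the residue (L-1)%M from the remaining set
theorem pv_step_left (M L R : Int) (j : Nat) (hM2 : 2 ≤ M) (_hLR : L ≤ R) (_hsz : R - L ≤ M - 2)
    (hj : (j:Int) < M) :
    (R - (L - 1) < ((j:Int) - (L - 1)) % M) ↔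
      (R - L < ((j:Int) - L) % M ∧ (j:Int) ≠ (L - 1) % M) := by
  have hM0 : (0:Int) < M := by omega
  have ha0 : 0 ≤ ((j:Int) - L) % M := Int.emod_nonneg _ (by omega)
  have ha1 : ((j:Int) - L) % M < M := Int.emod_lt_of_pos _ hM0
  have hjm : (j:Int) % M = j := Int.emod_eq_of_lt (by omega) hj
  have key1 : ((j:Int) - (L - 1)) % M = (((j:Int) - L) % M + 1) % M := by
    rw [show (j:Int) - (L - 1) = ((j:Int) - L) + 1 by ring, Int.add_emod ((j:Int) - L) 1 M,
        Int.emod_eq_of_lt (a := (1:Int)) (by omega) (by omega)]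
  have keyeq : ((j:Int) = (L - 1) % M) ↔ (((j:Int) - L) % M + 1) % M = 0 := by
    rw [← key1]
    constructor
    · intro h
      rw [h, pv_sub_emod_left]
      simp
    · intro h
      have h2 : (j:Int) % M = (L - 1) % M := by
        rw [Int.emod_eq_emod_iff_emod_sub_eq_zero]
        exact h
      rw [hjm] at h2
      exact h2
  by_cases haM : ((j:Int) - L) % M = M - 1
  · have hz : (((j:Int) - L) % M + 1) % M = 0 := by
      rw [haM, show M - 1 + 1 = M by ring]
      simp
    have heq : (j:Int) = (L - 1) % M := keyeq.2 hz
    rw [key1, hz]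
    constructor
    · intro h; omega
    · intro h; exact absurd heq h.2
  · have hz : (((j:Int) - L) % M + 1) % M = ((j:Int) - L) % M + 1 :=
      Int.emod_eq_of_lt (by omega) (by omega)
    have hne : (j:Int) ≠ (L - 1) % M := by
      intro h; have := keyeq.1 h; omega
    rw [key1, hz]
    constructor
    · intro h; exact ⟨by omega, hne⟩
    · intro h; omega

-- extending the arc to the right removes exactly the residue (R+1)%M from the remaining set
theorem pv_step_right (M L R : Int) (j : Nat) (hM2 : 2 ≤ M) (hLR : L ≤ R) (hsz : R - L ≤ M - 2)
    (hj : (j:Int) < M) :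
    ((R + 1) - L < ((j:Int) - L) % M) ↔
      (R - L < ((j:Int) - L) % M ∧ (j:Int) ≠ (R + 1) % M) := by
  have hM0 : (0:Int) < M := by omega
  have ha0 : 0 ≤ ((j:Int) - L) % M := Int.emod_nonneg _ (by omega)
  have ha1 : ((j:Int) - L) % M < M := Int.emod_lt_of_pos _ hM0
  have hjm : (j:Int) % M = j := Int.emod_eq_of_lt (by omega) hj
  have key : ((j:Int) = (R + 1) % M) ↔ ((j:Int) - L) % M = R - L + 1 := by
    constructor
    · intro h
      rw [h, pv_sub_emod_left, show R + 1 - L = R - L + 1 by ring]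
      exact Int.emod_eq_of_lt (by omega) (by omega)
    · intro h
      have h2 : ((j:Int) - L) % M = (R + 1 - L) % M := by
        rw [h, show R + 1 - L = R - L + 1 by ring]
        exact (Int.emod_eq_of_lt (by omega) (by omega)).symm
      have h3 : (j:Int) % M = (R + 1) % M := by
        rw [Int.emod_eq_emod_iff_emod_sub_eq_zero] at h2 ⊢
        rw [show (j:Int) - (R + 1) = (j:Int) - L - (R + 1 - L) by ring]
        exact h2
      rw [hjm] at h3
      exact h3
  constructor
  · intro h
    refine ⟨by omega, ?_⟩
    intro he
    have := key.1 he
    omega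
  · intro h
    rcases h with ⟨h1, h2⟩
    have : ((j:Int) - L) % M ≠ R - L + 1 := fun he => h2 (key.2 he)
    omega

theorem pv_add_emod_right (a b n : Int) : (a + b % n) % n = (a + b) % n := by
  conv_lhs => rw [Int.add_emod a (b % n) n, Int.emod_emod_of_dvd b dvd_rfl]
  rw [← Int.add_emod]

theorem pv_add_emod_left (a b n : Int) : (a % n + b) % n = (a + b) % n := by
  conv_lhs => rw [Int.add_emod (a % n) b n, Int.emod_emod_of_dvd a dvd_rfl]
  rw [← Int.add_emod]

-- the main invariant: A's destructive loop from a cursor at one end of the visited arc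
-- computes the same answer as iterating B's arc step, with the vertical cost pre-summed
theorem pv_loop (cnt0 pos : List Int)
    (hbnd : ∀ x ∈ pos, 0 ≤ x ∧ x < (cnt0.length : Int))
    (hmono : ∀ j k : Nat, j < pos.length → k < pos.length → j < k → pos.getD j 0 < pos.getD k 0) :
    ∀ (k : Nat) (fa : Nat) (L R : Int) (c : Nat) (cntA : List Int) (ansA ansB : Int),
      L ≤ R →
      R - L = (pos.length : Int) - 1 - k →
      c < pos.length →
      ((c:Int) = L % (pos.length : Int) ∨ (c:Int) = R % (pos.length : Int)) →
      cntA.length = cnt0.length →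
      (∀ x : Int, 0 ≤ x → x < (cnt0.length : Int) →
        (PySem.List.pyGetD cntA x 0 ≠ 0 ↔ ∃ j : Nat, j < pos.length ∧
          (R - L < ((j:Int) - L) % (pos.length : Int) ∨ j = c) ∧ x = pos.getD j 0)) →
      (∀ x : Int, 0 ≤ x → x < (cnt0.length : Int) → PySem.List.pyGetD cntA x 0 ≠ 0 →
        PySem.List.pyGetD cntA x 0 = PySem.List.pyGetD cnt0 x 0) →
      ansB = ansA + pvS pos.length
          (fun j => decide (R - L < ((j:Int) - L) % (pos.length : Int)) || decide (j = c))
          (fun j => PySem.List.pyGetD cnt0 (pos.getD j 0) 0) →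
      k + 1 ≤ fa →
      aLoop (cnt0.length : Int) fa cntA (pos.getD c 0) ansA
        = (pvIter pos (cnt0.length : Int) (pos.length : Int) k
            (L % (pos.length : Int), R % (pos.length : Int), (c:Int), ansB)).2.2.2 := by
  intro k
  induction k with
  | zero =>
    intro fa L R c cntA ansA ansB hLR hsize hc hcres hlen hsupp hval hans hfa
    cases fa with
    | zero => omega
    | succ fa =>
      have hm0 : 0 < pos.length := by omega
      have hpcm : pos.getD c 0 ∈ pos := by
        rw [List.getD_eq_getElem _ _ hc]; exact List.getElem_mem _
      have hpcb := hbnd _ hpcm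
      have hnzc : PySem.List.pyGetD cntA (pos.getD c 0) 0 ≠ 0 :=
        (hsupp _ hpcb.1 hpcb.2).2 ⟨c, hc, Or.inr rfl, rfl⟩
      have hcc : PySem.List.pyGetD cntA (pos.getD c 0) 0
          = PySem.List.pyGetD cnt0 (pos.getD c 0) 0 := hval _ hpcb.1 hpcb.2 hnzc
      have hset : PySem.List.pySetD cntA (pos.getD c 0) 0 = cntA.set (pos.getD c 0).toNat 0 :=
        PySem.List.pySetD_of_nonneg cntA 0 hpcb.1
      have hlen' : (cntA.set (pos.getD c 0).toNat 0).length = cnt0.length := by simp [hlen]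
      have hsetval : ∀ x : Int, 0 ≤ x → x < (cnt0.length : Int) →
          PySem.List.pyGetD (cntA.set (pos.getD c 0).toNat 0) x 0
            = if x = pos.getD c 0 then 0 else PySem.List.pyGetD cntA x 0 := by
        intro x h0 h1
        rw [PySem.List.pyGetD_eq_getElem _ 0 h0 (by omega)]
        by_cases hx : x = pos.getD c 0
        · subst hx
          rw [if_pos rfl, List.getElem_set_self (by omega)]
        · rw [if_neg hx, List.getElem_set_ne (by omega),
              ← PySem.List.pyGetD_eq_getElem cntA 0 h0 (by omega)]
      have hzero' : ∀ x : Int, 0 ≤ x → x < (cnt0.length : Int) →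
          PySem.List.pyGetD (cntA.set (pos.getD c 0).toNat 0) x 0 = 0 := by
        intro x h0 h1
        rw [hsetval x h0 h1]
        by_cases hx : x = pos.getD c 0
        · simp [hx]
        · rw [if_neg hx]
          by_contra hne
          obtain ⟨j, hj, hor, heq⟩ := (hsupp x h0 h1).1 hne
          rcases hor with hremj | rfl
          · have : ((j:Int) - L) % (pos.length : Int) < (pos.length : Int) :=
              Int.emod_lt_of_pos _ (by exact_mod_cast hm0)
            omega
          · exact hx heq
      have hallz : ((cntA.set (pos.getD c 0).toNat 0).all (fun i => i == 0)) = true := by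
        rw [List.all_eq_true]
        intro v hv
        obtain ⟨idx, hidx, rfl⟩ := List.mem_iff_getElem.1 hv
        have h1 : ((idx : Int)) < (cnt0.length : Int) := by
          rw [hlen'] at hidx; exact_mod_cast hidx
        have hz := hzero' idx (by omega) h1
        rw [PySem.List.pyGetD_eq_getElem _ 0 (by omega) (by omega)] at hz
        simpa using hz
      rw [aLoop, hset, hallz]
      simp only [if_true]
      have hsum : pvS pos.length
          (fun j => decide (R - L < ((j:Int) - L) % (pos.length : Int)) || decide (j = c))
          (fun j => PySem.List.pyGetD cnt0 (pos.getD j 0) 0)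
          = PySem.List.pyGetD cnt0 (pos.getD c 0) 0 := by
        have hpq : ∀ j : Nat, j < pos.length →
            (decide (R - L < ((j:Int) - L) % (pos.length : Int)) || decide (j = c))
              = (false || j == c) := by
          intro j hjm
          have hd : decide (R - L < ((j:Int) - L) % (pos.length : Int)) = false := by
            apply decide_eq_false
            intro h
            have : ((j:Int) - L) % (pos.length : Int) < (pos.length : Int) :=
              Int.emod_lt_of_pos _ (by exact_mod_cast hm0)
            omega
          rw [hd, Bool.false_or, Bool.false_or, Bool.eq_iff_iff]
          simp
        have := pv_sum_split pos.length
          (fun j => decide (R - L < ((j:Int) - L) % (pos.length : Int)) || decide (j = c))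
          (fun _ => false)
          (fun j => PySem.List.pyGetD cnt0 (pos.getD j 0) 0) c hc rfl hpq
        rw [this]
        simp [pvS]
      rw [hcc]
      show ansA + PySem.List.pyGetD cnt0 (pos.getD c 0) 0 = ansB
      rw [hans, hsum]
  | succ k ih =>
    intro fa L R c cntA ansA ansB hLR hsize hc hcres hlen hsupp hval hans hfa
    cases fa with
    | zero => omega
    | succ fa =>
      have hm0 : 0 < pos.length := by omega
      have hmem : ∀ j : Nat, j < pos.length → pos.getD j 0 ∈ pos := by
        intro j hj; rw [List.getD_eq_getElem _ _ hj]; exact List.getElem_mem _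
      have hpcb := hbnd _ (hmem c hc)
      have hn0 : (0:Int) < (cnt0.length : Int) := by omega
      have hM2 : (2:Int) ≤ (pos.length : Int) := by omega
      have hsz : R - L ≤ (pos.length : Int) - 2 := by omega
      have hinj : ∀ j k : Nat, j < pos.length → k < pos.length →
          pos.getD j 0 = pos.getD k 0 → j = k := by
        intro j k hj hk he
        by_contra hne
        rcases Nat.lt_or_ge j k with h | h
        · exact absurd he (ne_of_lt (hmono j k hj hk h))
        · exact absurd he (ne_of_gt (hmono k j hk hj (by omega)))
      -- the two arc neighbours as Nat residues
      have hTL0 : 0 ≤ (L - 1) % (pos.length : Int) := Int.emod_nonneg _ (by omega)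
      have hTL1 : (L - 1) % (pos.length : Int) < (pos.length : Int) := Int.emod_lt_of_pos _ (by omega)
      have hTR0 : 0 ≤ (R + 1) % (pos.length : Int) := Int.emod_nonneg _ (by omega)
      have hTR1 : (R + 1) % (pos.length : Int) < (pos.length : Int) := Int.emod_lt_of_pos _ (by omega)
      have htln : ((((L - 1) % (pos.length : Int)).toNat : Nat) : Int) = (L - 1) % (pos.length : Int) :=
        Int.toNat_of_nonneg hTL0
      have htrn : ((((R + 1) % (pos.length : Int)).toNat : Nat) : Int) = (R + 1) % (pos.length : Int) :=
        Int.toNat_of_nonneg hTR0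
      have htlnm : ((L - 1) % (pos.length : Int)).toNat < pos.length := by omega
      have htrnm : ((R + 1) % (pos.length : Int)).toNat < pos.length := by omega
      have hremtl : R - L < (((((L - 1) % (pos.length : Int)).toNat : Nat) : Int) - L) % (pos.length : Int) := by
        rw [htln]; exact pv_rem_tl _ L R hM2 hLR hsz
      have hremtr : R - L < (((((R + 1) % (pos.length : Int)).toNat : Nat) : Int) - L) % (pos.length : Int) := by
        rw [htrn]; exact pv_rem_tr _ L R hM2 hLR hsz
      have hnotc : ¬ (R - L < (((c : Nat) : Int) - L) % (pos.length : Int)) :=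
        pv_notrem_c _ L R c (by omega) hLR (by omega) hcres
      have htlnc : ((L - 1) % (pos.length : Int)).toNat ≠ c := by
        intro h; rw [h] at hremtl; exact hnotc hremtl
      have htrnc : ((R + 1) % (pos.length : Int)).toNat ≠ c := by
        intro h; rw [h] at hremtr; exact hnotc hremtr
      have hbtl := hbnd _ (hmem _ htlnm)
      have hbtr := hbnd _ (hmem _ htrnm)
      -- A: add the vertical cost at the cursor and zero the entry
      have hnzc : PySem.List.pyGetD cntA (pos.getD c 0) 0 ≠ 0 :=
        (hsupp _ hpcb.1 hpcb.2).2 ⟨c, hc, Or.inr rfl, rfl⟩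
      have hcc : PySem.List.pyGetD cntA (pos.getD c 0) 0
          = PySem.List.pyGetD cnt0 (pos.getD c 0) 0 := hval _ hpcb.1 hpcb.2 hnzc
      have hset : PySem.List.pySetD cntA (pos.getD c 0) 0 = cntA.set (pos.getD c 0).toNat 0 :=
        PySem.List.pySetD_of_nonneg cntA 0 hpcb.1
      have hlen' : (cntA.set (pos.getD c 0).toNat 0).length = cnt0.length := by simp [hlen]
      have hlenn : ((cntA.set (pos.getD c 0).toNat 0).length : Int) = (cnt0.length : Int) := by
        exact_mod_cast hlen'
      have hsetval : ∀ x : Int, 0 ≤ x → x < (cnt0.length : Int) →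
          PySem.List.pyGetD (cntA.set (pos.getD c 0).toNat 0) x 0
            = if x = pos.getD c 0 then 0 else PySem.List.pyGetD cntA x 0 := by
        intro x h0 h1
        rw [PySem.List.pyGetD_eq_getElem _ 0 h0 (by omega)]
        by_cases hx : x = pos.getD c 0
        · subst hx
          rw [if_pos rfl, List.getElem_set_self (by omega)]
        · rw [if_neg hx, List.getElem_set_ne (by omega),
              ← PySem.List.pyGetD_eq_getElem cntA 0 h0 (by omega)]
      have hsup' : ∀ x : Int, 0 ≤ x → x < (cnt0.length : Int) →
          (PySem.List.pyGetD (cntA.set (pos.getD c 0).toNat 0) x 0 ≠ 0 ↔ ∃ j : Nat, j < pos.length ∧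
            (R - L < ((j:Int) - L) % (pos.length : Int)) ∧ x = pos.getD j 0) := by
        intro x h0 h1
        rw [hsetval x h0 h1]
        by_cases hx : x = pos.getD c 0
        · rw [if_pos hx]
          constructor
          · intro h; exact absurd rfl h
          · rintro ⟨j, hj, hremj, heq⟩
            have hjc : j = c := hinj j c hj hc (by rw [← heq, hx])
            subst hjc
            exact absurd hremj hnotc
        · rw [if_neg hx, hsupp x h0 h1]
          constructor
          · rintro ⟨j, hj, hor, heq⟩
            rcases hor with h | rfl
            · exact ⟨j, hj, h, heq⟩
            · exact absurd heq hx
          · rintro ⟨j, hj, h, heq⟩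
            exact ⟨j, hj, Or.inl h, heq⟩
      have hval' : ∀ x : Int, 0 ≤ x → x < (cnt0.length : Int) →
          PySem.List.pyGetD (cntA.set (pos.getD c 0).toNat 0) x 0 ≠ 0 →
          PySem.List.pyGetD (cntA.set (pos.getD c 0).toNat 0) x 0 = PySem.List.pyGetD cnt0 x 0 := by
        intro x h0 h1 hne
        rw [hsetval x h0 h1] at hne ⊢
        by_cases hx : x = pos.getD c 0
        · rw [if_pos hx] at hne; exact absurd rfl hne
        · rw [if_neg hx] at hne ⊢; exact hval x h0 h1 hne
      have hnz_tl : PySem.List.pyGetD (cntA.set (pos.getD c 0).toNat 0)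
          (pos.getD ((L - 1) % (pos.length : Int)).toNat 0) 0 ≠ 0 :=
        (hsup' _ hbtl.1 hbtl.2).2 ⟨_, htlnm, hremtl, rfl⟩
      have hnz_tr : PySem.List.pyGetD (cntA.set (pos.getD c 0).toNat 0)
          (pos.getD ((R + 1) % (pos.length : Int)).toNat 0) 0 ≠ 0 :=
        (hsup' _ hbtr.1 hbtr.2).2 ⟨_, htrnm, hremtr, rfl⟩
      have hallf : ((cntA.set (pos.getD c 0).toNat 0).all (fun i => i == 0)) = false := by
        rw [List.all_eq_false]
        have h := hnz_tl
        rw [PySem.List.pyGetD_eq_getElem _ 0 hbtl.1 (by omega)] at h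
        exact ⟨(cntA.set (pos.getD c 0).toNat 0)[(pos.getD ((L - 1) % (pos.length : Int)).toNat 0).toNat]'(by omega),
          List.getElem_mem _, by simpa using h⟩
      -- the two scan distances of A
      have hDl := pv_D_val pos (cnt0.length : Int) hbnd hmono c _ hc htlnm htlnc
      have hDr := pv_D_val pos (cnt0.length : Int) hbnd hmono _ c htrnm hc (fun h => htrnc h.symm)
      have hd1l : 1 ≤ (pos.getD c 0 - pos.getD ((L - 1) % (pos.length : Int)).toNat 0) % (cnt0.length : Int) ∧
          (pos.getD c 0 - pos.getD ((L - 1) % (pos.length : Int)).toNat 0) % (cnt0.length : Int) < (cnt0.length : Int) := by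
        rw [hDl]
        split_ifs with h
        · have := hmono _ c htlnm hc h
          omega
        · have : c < ((L - 1) % (pos.length : Int)).toNat := by omega
          have := hmono c _ hc htlnm this
          omega
      have hd1r : 1 ≤ (pos.getD ((R + 1) % (pos.length : Int)).toNat 0 - pos.getD c 0) % (cnt0.length : Int) ∧
          (pos.getD ((R + 1) % (pos.length : Int)).toNat 0 - pos.getD c 0) % (cnt0.length : Int) < (cnt0.length : Int) := by
        rw [hDr]
        split_ifs with h
        · have := hmono c _ hc htrnm h
          omega
        · have : ((R + 1) % (pos.length : Int)).toNat < c := by omega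
          have := hmono _ c htrnm hc this
          omega
      have hn2 : (2:Int) ≤ (cnt0.length : Int) := by omega
      -- the left scan meets only zero entries before the left neighbour
      have hzl : ∀ e : Int, 1 ≤ e →
          e < (pos.getD c 0 - pos.getD ((L - 1) % (pos.length : Int)).toNat 0) % (cnt0.length : Int) →
          PySem.List.pyGetD (cntA.set (pos.getD c 0).toNat 0) (pos.getD c 0 - e) 0 = 0 := by
        intro e he1 he2
        rw [pv_pyGetD_emod _ (pos.getD c 0 - e) (by omega) (by omega)]
        simp only [hlen']
        by_contra hne
        obtain ⟨j, hj, hremj, heq⟩ := (hsup' _ (Int.emod_nonneg _ (by omega))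
          (Int.emod_lt_of_pos _ (by omega))).1 hne
        have hjc : j ≠ c := fun h => hnotc (h ▸ hremj)
        have he : (pos.getD c 0 - pos.getD j 0) % (cnt0.length : Int) = e := by
          rw [← heq, pv_sub_emod_right, show pos.getD c 0 - (pos.getD c 0 - e) = e by ring]
          exact Int.emod_eq_of_lt (by omega) (by omega)
        have hdelta := pv_delta_left (pos.length : Int) L R c j hM2 hLR hsz hcres
          (by exact_mod_cast hj) hremj
        rw [← htln] at hdelta
        have hdmin := pv_D_mono_left pos (cnt0.length : Int) hbnd hmono c _ j hc htlnm hj htlnc hjc hdelta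
        omega
      have hsl : PySem.List.pyGetD (cntA.set (pos.getD c 0).toNat 0)
          (pos.getD c 0 - (pos.getD c 0 - pos.getD ((L - 1) % (pos.length : Int)).toNat 0) % (cnt0.length : Int)) 0 ≠ 0 := by
        rw [pv_pyGetD_emod _ _ (by omega) (by omega)]
        simp only [hlen']
        rw [pv_sub_emod_right, show pos.getD c 0 - (pos.getD c 0 - pos.getD ((L - 1) % (pos.length : Int)).toNat 0)
              = pos.getD ((L - 1) % (pos.length : Int)).toNat 0 by ring,
            Int.emod_eq_of_lt hbtl.1 hbtl.2]
        exact hnz_tl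
      -- the right scan meets only zero entries before the right neighbour
      have hzr : ∀ e : Int, 1 ≤ e →
          e < (pos.getD ((R + 1) % (pos.length : Int)).toNat 0 - pos.getD c 0) % (cnt0.length : Int) →
          PySem.List.pyGetD (cntA.set (pos.getD c 0).toNat 0) ((pos.getD c 0 + e) % (cnt0.length : Int)) 0 = 0 := by
        intro e he1 he2
        by_contra hne
        obtain ⟨j, hj, hremj, heq⟩ := (hsup' _ (Int.emod_nonneg _ (by omega))
          (Int.emod_lt_of_pos _ (by omega))).1 hne
        have hjc : j ≠ c := fun h => hnotc (h ▸ hremj)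
        have he : (pos.getD j 0 - pos.getD c 0) % (cnt0.length : Int) = e := by
          rw [← heq, pv_sub_emod_left, show pos.getD c 0 + e - pos.getD c 0 = e by ring]
          exact Int.emod_eq_of_lt (by omega) (by omega)
        have hdelta := pv_delta_right (pos.length : Int) L R c j hM2 hLR hsz hcres
          (by exact_mod_cast hj) hremj
        rw [← htrn] at hdelta
        have hdmin := pv_D_mono_right pos (cnt0.length : Int) hbnd hmono c _ j hc htrnm hj htrnc hjc hdelta
        omega
      have hnormr : (pos.getD c 0 + (pos.getD ((R + 1) % (pos.length : Int)).toNat 0 - pos.getD c 0) % (cnt0.length : Int)) % (cnt0.length : Int)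
          = pos.getD ((R + 1) % (pos.length : Int)).toNat 0 := by
        rw [pv_add_emod_right, show pos.getD c 0 + (pos.getD ((R + 1) % (pos.length : Int)).toNat 0 - pos.getD c 0)
              = pos.getD ((R + 1) % (pos.length : Int)).toNat 0 by ring]
        exact Int.emod_eq_of_lt hbtr.1 hbtr.2
      have hsr : PySem.List.pyGetD (cntA.set (pos.getD c 0).toNat 0)
          ((pos.getD c 0 + (pos.getD ((R + 1) % (pos.length : Int)).toNat 0 - pos.getD c 0) % (cnt0.length : Int)) % (cnt0.length : Int)) 0 ≠ 0 := by
        rw [hnormr]; exact hnz_tr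
      have hscanl : aScanLeft (cntA.set (pos.getD c 0).toNat 0) (cntA.set (pos.getD c 0).toNat 0).length
          (pos.getD c 0 - 1) 1
          = (pos.getD c 0 - (pos.getD c 0 - pos.getD ((L - 1) % (pos.length : Int)).toNat 0) % (cnt0.length : Int),
             (pos.getD c 0 - pos.getD ((L - 1) % (pos.length : Int)).toNat 0) % (cnt0.length : Int)) := by
        apply pv_scanLeft_run _ _ _ hd1l.1 (by omega) hpcb.1 (by omega) hzl hsl
          (((pos.getD c 0 - pos.getD ((L - 1) % (pos.length : Int)).toNat 0) % (cnt0.length : Int) - 1).toNat)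
          _ 1 (by omega) (by omega) (by omega)
      have hscanr : aScanRight (cntA.set (pos.getD c 0).toNat 0) (cnt0.length : Int)
          (cntA.set (pos.getD c 0).toNat 0).length
          ((pos.getD c 0 + 1) % (cnt0.length : Int)) 1
          = ((pos.getD c 0 + (pos.getD ((R + 1) % (pos.length : Int)).toNat 0 - pos.getD c 0) % (cnt0.length : Int)) % (cnt0.length : Int),
             (pos.getD ((R + 1) % (pos.length : Int)).toNat 0 - pos.getD c 0) % (cnt0.length : Int)) := by
        apply pv_scanRight_run _ _ _ _ hlenn.symm hn2 hd1r.1 hd1r.2 hpcb.1 hpcb.2 hzr hsr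
          (((pos.getD ((R + 1) % (pos.length : Int)).toNat 0 - pos.getD c 0) % (cnt0.length : Int) - 1).toNat)
          _ 1 (by omega) (by omega) (by omega)
      have hMpos : (0:Int) < (pos.length : Int) := by omega
      -- the remaining set after extending the arc right / left, in terms of the old one
      have hstepR : ∀ j : Nat, j < pos.length →
          (((R + 1) - L < ((j:Int) - L) % (pos.length : Int) ∨ j = ((R + 1) % (pos.length : Int)).toNat)
            ↔ R - L < ((j:Int) - L) % (pos.length : Int)) := by
        intro j hj
        constructor
        · rintro (h | rfl)
          · exact ((pv_step_right _ L R j hM2 hLR hsz (by exact_mod_cast hj)).1 h).1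
          · exact hremtr
        · intro h
          by_cases hjt : j = ((R + 1) % (pos.length : Int)).toNat
          · exact Or.inr hjt
          · refine Or.inl ((pv_step_right _ L R j hM2 hLR hsz (by exact_mod_cast hj)).2 ⟨h, ?_⟩)
            intro he
            exact hjt (by exact_mod_cast (htrn ▸ he : (j:Int) = ((((R + 1) % (pos.length : Int)).toNat : Nat) : Int)))
      have hstepL : ∀ j : Nat, j < pos.length →
          ((R - (L - 1) < ((j:Int) - (L - 1)) % (pos.length : Int) ∨ j = ((L - 1) % (pos.length : Int)).toNat)
            ↔ R - L < ((j:Int) - L) % (pos.length : Int)) := by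
        intro j hj
        constructor
        · rintro (h | rfl)
          · exact ((pv_step_left _ L R j hM2 hLR hsz (by exact_mod_cast hj)).1 h).1
          · exact hremtl
        · intro h
          by_cases hjt : j = ((L - 1) % (pos.length : Int)).toNat
          · exact Or.inr hjt
          · refine Or.inl ((pv_step_left _ L R j hM2 hLR hsz (by exact_mod_cast hj)).2 ⟨h, ?_⟩)
            intro he
            exact hjt (by exact_mod_cast (htln ▸ he : (j:Int) = ((((L - 1) % (pos.length : Int)).toNat : Nat) : Int)))
      -- the pre-summed vertical cost loses exactly the cursor's entry
      have hsplitR : pvS pos.length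
            (fun j => decide (R - L < ((j:Int) - L) % (pos.length : Int)) || decide (j = c))
            (fun j => PySem.List.pyGetD cnt0 (pos.getD j 0) 0)
          = pvS pos.length
            (fun j => decide ((R + 1) - L < ((j:Int) - L) % (pos.length : Int)) || decide (j = ((R + 1) % (pos.length : Int)).toNat))
            (fun j => PySem.List.pyGetD cnt0 (pos.getD j 0) 0)
            + PySem.List.pyGetD cnt0 (pos.getD c 0) 0 := by
        apply pv_sum_split _ _ _ _ c hc
        · simp only [Bool.or_eq_false_iff, decide_eq_false_iff_not]
          constructor
          · intro h
            exact hnotc ((hstepR c hc).1 (Or.inl h))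
          · intro h
            exact htrnc h.symm
        · intro j hj
          rw [Bool.eq_iff_iff]
          simp only [Bool.or_eq_true, decide_eq_true_eq, beq_iff_eq]
          constructor
          · rintro (h | h)
            · exact Or.inl ((hstepR j hj).2 h)
            · exact Or.inr h
          · rintro (h | h)
            · exact Or.inl ((hstepR j hj).1 h)
            · exact Or.inr h
      have hsplitL : pvS pos.length
            (fun j => decide (R - L < ((j:Int) - L) % (pos.length : Int)) || decide (j = c))
            (fun j => PySem.List.pyGetD cnt0 (pos.getD j 0) 0)
          = pvS pos.length
            (fun j => decide (R - (L - 1) < ((j:Int) - (L - 1)) % (pos.length : Int)) || decide (j = ((L - 1) % (pos.length : Int)).toNat))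
            (fun j => PySem.List.pyGetD cnt0 (pos.getD j 0) 0)
            + PySem.List.pyGetD cnt0 (pos.getD c 0) 0 := by
        apply pv_sum_split _ _ _ _ c hc
        · simp only [Bool.or_eq_false_iff, decide_eq_false_iff_not]
          constructor
          · intro h
            exact hnotc ((hstepL c hc).1 (Or.inl h))
          · intro h
            exact htlnc h.symm
        · intro j hj
          rw [Bool.eq_iff_iff]
          simp only [Bool.or_eq_true, decide_eq_true_eq, beq_iff_eq]
          constructor
          · rintro (h | h)
            · exact Or.inl ((hstepL j hj).2 h)
            · exact Or.inr h
          · rintro (h | h)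
            · exact Or.inl ((hstepL j hj).1 h)
            · exact Or.inr h
      -- normalising A's next cursor on the left branch
      have hnorml : (pos.getD c 0 - (pos.getD c 0 - pos.getD ((L - 1) % (pos.length : Int)).toNat 0) % (cnt0.length : Int)) % (cnt0.length : Int)
          = pos.getD ((L - 1) % (pos.length : Int)).toNat 0 := by
        rw [pv_sub_emod_right, show pos.getD c 0 - (pos.getD c 0 - pos.getD ((L - 1) % (pos.length : Int)).toNat 0)
              = pos.getD ((L - 1) % (pos.length : Int)).toNat 0 by ring]
        exact Int.emod_eq_of_lt hbtl.1 hbtl.2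
      have hlcur : (if pos.getD c 0 - (pos.getD c 0 - pos.getD ((L - 1) % (pos.length : Int)).toNat 0) % (cnt0.length : Int) < 0
            then (cnt0.length : Int) + (pos.getD c 0 - (pos.getD c 0 - pos.getD ((L - 1) % (pos.length : Int)).toNat 0) % (cnt0.length : Int))
            else pos.getD c 0 - (pos.getD c 0 - pos.getD ((L - 1) % (pos.length : Int)).toNat 0) % (cnt0.length : Int))
          = pos.getD ((L - 1) % (pos.length : Int)).toNat 0 := by
        by_cases hneg : pos.getD c 0 - (pos.getD c 0 - pos.getD ((L - 1) % (pos.length : Int)).toNat 0) % (cnt0.length : Int) < 0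
        · rw [if_pos hneg]
          rw [pv_emod_neg _ _ hn0 (by omega) hneg] at hnorml
          omega
        · rw [if_neg hneg]
          rw [Int.emod_eq_of_lt (by omega) (by omega)] at hnorml
          exact hnorml
      -- B reads its two candidate targets by index arithmetic
      have hgetTL : PySem.List.pyGetD pos ((L - 1) % (pos.length : Int)) 0
          = pos.getD ((L - 1) % (pos.length : Int)).toNat 0 := by
        conv_lhs => rw [← htln]
        rw [PySem.List.pyGetD_natCast]
      have hgetTR : PySem.List.pyGetD pos ((R + 1) % (pos.length : Int)) 0
          = pos.getD ((R + 1) % (pos.length : Int)).toNat 0 := by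
        conv_lhs => rw [← htrn]
        rw [PySem.List.pyGetD_natCast]
      -- unfold one round of A and one iteration of B
      rw [aLoop, hset, hcc, hallf]
      simp only [Bool.false_eq_true, if_false]
      simp only [PySem.Int.mod_eq_emod_of_pos hn0]
      rw [hscanl, hscanr, hnormr]
      simp only [pvIter, bStep]
      simp only [PySem.Int.mod_eq_emod_of_pos hn0, PySem.Int.mod_eq_emod_of_pos hMpos]
      rw [pv_sub_emod_left, pv_add_emod_left, hgetTL, hgetTR]
      simp only [PySem.List.pyGetD_natCast]
      by_cases hgt : (pos.getD c 0 - pos.getD ((L - 1) % (pos.length : Int)).toNat 0) % (cnt0.length : Int)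
          > (pos.getD ((R + 1) % (pos.length : Int)).toNat 0 - pos.getD c 0) % (cnt0.length : Int)
      · rw [if_pos hgt, if_pos hgt]
        have hIH := ih fa L (R + 1) ((R + 1) % (pos.length : Int)).toNat
          (cntA.set (pos.getD c 0).toNat 0)
          (ansA + PySem.List.pyGetD cnt0 (pos.getD c 0) 0
            + (pos.getD ((R + 1) % (pos.length : Int)).toNat 0 - pos.getD c 0) % (cnt0.length : Int))
          (ansB + (pos.getD ((R + 1) % (pos.length : Int)).toNat 0 - pos.getD c 0) % (cnt0.length : Int))
          (by omega) (by omega) htrnm (Or.inr htrn) hlen'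
          (by
            intro x h0 h1
            rw [hsup' x h0 h1]
            constructor
            · rintro ⟨j, hj, h, heq⟩
              exact ⟨j, hj, (hstepR j hj).2 h, heq⟩
            · rintro ⟨j, hj, h, heq⟩
              exact ⟨j, hj, (hstepR j hj).1 h, heq⟩)
          hval'
          (by rw [hans, hsplitR]; ring)
          (by omega)
        rw [htrn] at hIH
        exact hIH
      · rw [if_neg hgt, if_neg hgt, hlcur]
        have hIH := ih fa (L - 1) R ((L - 1) % (pos.length : Int)).toNat
          (cntA.set (pos.getD c 0).toNat 0)
          (ansA + PySem.List.pyGetD cnt0 (pos.getD c 0) 0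
            + (pos.getD c 0 - pos.getD ((L - 1) % (pos.length : Int)).toNat 0) % (cnt0.length : Int))
          (ansB + (pos.getD c 0 - pos.getD ((L - 1) % (pos.length : Int)).toNat 0) % (cnt0.length : Int))
          (by omega) (by omega) htlnm (Or.inl htln) hlen'
          (by
            intro x h0 h1
            rw [hsup' x h0 h1]
            constructor
            · rintro ⟨j, hj, h, heq⟩
              exact ⟨j, hj, (hstepL j hj).2 h, heq⟩
            · rintro ⟨j, hj, h, heq⟩
              exact ⟨j, hj, (hstepL j hj).1 h, heq⟩)
          hval'
          (by rw [hans, hsplitL]; ring)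
          (by omega)
        rw [htln] at hIH
        exact hIH

-- B's position list is the filtered index range
theorem pv_pos_eq (cnt : List Int) :
    ((PySem.List.enumerate cnt 0).filter (fun p => p.2 != 0)).map (·.1)
      = (PySem.List.pyRange 0 (cnt.length : Int) 1).filter (fun i => PySem.List.pyGetD cnt i 0 ≠ 0) := by
  rw [PySem.List.enumerate_eq_map_pyRange cnt 0, List.filter_map, List.map_map]
  have h1 : PySem.List.len cnt = (cnt.length : Int) := by simp [PySem.List.len]
  rw [h1]
  have hg : ((fun p : Int × Int => p.1) ∘ fun j : Int => (j, PySem.List.pyGetD cnt j 0))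
      = id := by funext j; rfl
  have hp : ((fun p : Int × Int => p.2 != 0) ∘ fun j : Int => (j, PySem.List.pyGetD cnt j 0))
      = (fun i : Int => decide (¬ PySem.List.pyGetD cnt i 0 = 0)) := by
    funext j
    rw [show ((fun p : Int × Int => p.2 != 0) ∘ fun j : Int => (j, PySem.List.pyGetD cnt j 0)) j
          = !decide (PySem.List.pyGetD cnt j 0 = 0) from rfl, decide_not]
  rw [hg, hp, List.map_id]

theorem pv_toNat_eq_A {c : Char} (h : c.toNat = 65) : c = 'A' := by
  have : c.val = 65 := by
    apply (UInt32.toNat_inj (a := c.val) (b := (65 : UInt32))).1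
    simpa using h
  exact Char.ext this

theorem pv_toNat_eq_br {c : Char} (h : c.toNat = 91) : c = '[' := by
  have : c.val = 91 := by
    apply (UInt32.toNat_inj (a := c.val) (b := (91 : UInt32))).1
    simpa using h
  exact Char.ext this

theorem pv_fval_ne (c : Char) (h1 : c ≠ 'A') (h2 : c ≠ '[') :
    min ((c.toNat : Int) - 65) (90 - (c.toNat : Int) + 1) ≠ 0 := by
  have hA : c.toNat ≠ 65 := fun h => h1 (pv_toNat_eq_A h)
  have hB : c.toNat ≠ 91 := fun h => h2 (pv_toNat_eq_br h)
  rcases min_cases ((c.toNat : Int) - 65) (90 - (c.toNat : Int) + 1) with ⟨hm, _⟩ | ⟨hm, _⟩ <;>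
    rw [hm] <;> omega

theorem pv_main : ∀ (name : String), Pre_solution name → solution name = solution_alt name := by
  intro name hpre
  obtain ⟨ch, hch, hprop⟩ := List.any_eq_true.1 hpre
  obtain ⟨hA, hBr⟩ : ch ≠ 'A' ∧ ch ≠ '[' := by
    constructor <;> intro h <;> subst h <;> simp at hprop
  simp only [solution, solution_alt]
  have hfuneq : (fun c : Char => min ((c.toNat : Int) - 65) (91 - (c.toNat : Int)))
      = (fun x : Char => min ((x.toNat : Int) - 65) (90 - (x.toNat : Int) + 1)) := by
    funext x; congr 1; ring
  rw [hfuneq]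
  have hvne : min ((ch.toNat : Int) - 65) (90 - (ch.toNat : Int) + 1) ≠ 0 := pv_fval_ne ch hA hBr
  generalize hcnt : name.toList.map (fun x => min ((x.toNat : Int) - 65) (90 - (x.toNat : Int) + 1)) = cnt
  have hlen2 : name.toList.length = cnt.length := by rw [← hcnt, List.length_map]
  rw [hlen2, pv_pos_eq cnt]
  have hvmem : min ((ch.toNat : Int) - 65) (90 - (ch.toNat : Int) + 1) ∈ cnt := by
    rw [← hcnt]; exact List.mem_map_of_mem hch
  cases haf : aFind cnt with
  | none => exact absurd ((pv_aFind_none cnt).1 haf _ hvmem) hvne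
  | some i =>
    obtain ⟨hilt, hinz, himin⟩ := pv_aFind_some cnt i haf
    have him : (i:Int) ∈ (PySem.List.pyRange 0 (cnt.length : Int) 1).filter
        (fun x => PySem.List.pyGetD cnt x 0 ≠ 0) := by
      apply (pv_mem_rem cnt _).2
      refine ⟨by omega, by exact_mod_cast hilt, ?_⟩
      rw [PySem.List.pyGetD_natCast, List.getD_eq_getElem _ _ hilt]
      simpa using hinz
    generalize hrem : (PySem.List.pyRange 0 (cnt.length : Int) 1).filter
        (fun x => PySem.List.pyGetD cnt x 0 ≠ 0) = rem at him
    have hsorted : rem.Pairwise (· < ·) := hrem ▸ pv_sorted_rem cnt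
    have hmemrem : ∀ x : Int, x ∈ rem ↔ (0 ≤ x ∧ x < (cnt.length : Int) ∧ PySem.List.pyGetD cnt x 0 ≠ 0) := by
      intro x; rw [← hrem]; exact pv_mem_rem cnt x
    have hmne : rem ≠ [] := fun h => by rw [h] at him; cases him
    have hm0 : rem.length ≠ 0 := by simpa [List.length_eq_zero_iff] using hmne
    have hmpos : 0 < rem.length := Nat.pos_of_ne_zero hm0
    rw [if_neg (by simp [hm0])]
    have hgh : rem.getD 0 0 = rem.headD 0 := by cases rem <;> simp
    have hc0 : rem.getD 0 0 = (i:Int) := by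
      rw [hgh]
      have h1 : rem.headD 0 ≤ (i:Int) := pv_headD_le_mem rem hsorted _ him
      have hmem0 : rem.headD 0 ∈ rem := by
        cases rem with
        | nil => exact absurd rfl hmne
        | cons a t => exact List.mem_cons_self ..
      obtain ⟨h0a, h0b, h0c⟩ := (hmemrem _).1 hmem0
      by_contra hne
      apply h0c
      have hlt : (rem.headD 0).toNat < i := by omega
      rw [show rem.headD 0 = (((rem.headD 0).toNat : Nat) : Int) by omega,
          PySem.List.pyGetD_natCast, List.getD_eq_getElem _ _ (by omega)]
      simpa using himin _ hlt
    have hgd : PySem.List.pyGetD rem 0 0 = rem.getD 0 0 := PySem.List.pyGetD_ofNat' rem 0 0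
    have hbnd' : ∀ x ∈ rem, 0 ≤ x ∧ x < (cnt.length : Int) := by
      intro x hx
      obtain ⟨a, b, _⟩ := (hmemrem x).1 hx
      exact ⟨a, b⟩
    have hmono' : ∀ j k : Nat, j < rem.length → k < rem.length → j < k → rem.getD j 0 < rem.getD k 0 := by
      intro j k hj hk hlt
      rw [List.getD_eq_getElem _ _ hj, List.getD_eq_getElem _ _ hk]
      exact List.pairwise_iff_getElem.1 hsorted j k hj hk hlt
    have hfuel : cnt.countP (fun v => v ≠ 0) = rem.length := by
      rw [← hrem]; exact (pv_rem_length cnt).symm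
    rw [pv_foldl_iter, List.length_range]
    have hloop := pv_loop cnt rem hbnd' hmono' (rem.length - 1) (cnt.countP (fun v => v ≠ 0))
      0 0 0 cnt (i:Int)
      (PySem.List.pyGetD rem 0 0 + (rem.map (fun p => PySem.List.pyGetD cnt p 0)).sum)
      le_rfl (by omega) hmpos (Or.inl (by simp)) rfl
      (by
        intro x h0 h1
        constructor
        · intro hne
          have hxm : x ∈ rem := (hmemrem x).2 ⟨h0, h1, hne⟩
          obtain ⟨j, hj, hje⟩ := List.mem_iff_getElem.1 hxm
          refine ⟨j, hj, ?_, by rw [List.getD_eq_getElem _ _ hj, hje]⟩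
          rcases Nat.eq_zero_or_pos j with rfl | hjp
          · exact Or.inr rfl
          · refine Or.inl ?_
            simp only [sub_zero]
            rw [Int.emod_eq_of_lt (by omega) (by exact_mod_cast hj)]
            omega
        · rintro ⟨j, hj, _, heq⟩
          have hjm : rem.getD j 0 ∈ rem := by
            rw [List.getD_eq_getElem _ _ hj]; exact List.getElem_mem _
          exact ((hmemrem _).1 (heq ▸ hjm)).2.2)
      (fun x _ _ _ => rfl)
      (by
        rw [hgd, hc0]
        congr 1
        rw [pv_sum_map rem (fun p => PySem.List.pyGetD cnt p 0)]
        unfold pvS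
        apply Finset.sum_congr rfl
        intro j hj
        have hjm := Finset.mem_range.1 hj
        have hptrue : (decide ((0:Int) - 0 < ((j:Int) - 0) % (rem.length : Int)) || decide (j = 0)) = true := by
          rcases Nat.eq_zero_or_pos j with rfl | hjp
          · simp
          · apply Bool.or_eq_true_iff.2
            refine Or.inl (decide_eq_true ?_)
            simp only [sub_zero]
            rw [Int.emod_eq_of_lt (by omega) (by exact_mod_cast hjm)]
            omega
        rw [if_pos hptrue])
      (by rw [hfuel]; omega)
    rw [hc0] at hloop
    rw [Int.zero_emod, Nat.cast_zero] at hloop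
    exact hloop

-- ===== VERDICT (by name: the statement is the Claim_ definition above) =====
theorem solution_spec : Claim_equal_solution := by
  unfold Claim_equal_solution Spec_solution
  intro name _ hpre
  exact pv_main name hpre
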